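-- pv_equiv track=rewrite | github.com/JupiterWalker/LEGOIZER_MVP | backend/postprocess/opt_from_tencent.py | propose_rects_from_component
-- ===== SOURCE A (Python) =====
-- from typing import List, Tuple, Dict, Set, Optional, Callable, Iterable
--
-- V2 = Tuple[int, int]
--
-- Rect = Tuple[int, int, int, int]  # (x0, y0, x1, y1) 闭区间
--
-- def rect_area(r: Rect) -> int:
--     return max(0, r[2] - r[0] + 1) * max(0, r[3] - r[1] + 1)
--
-- def cells_in_rect(r: Rect) -> Set[V2]:
--     xs = range(r[0], r[2] + 1)
--     ys = range(r[1], r[3] + 1)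
--     return {(x, y) for x in xs for y in ys}
--
-- def propose_rects_from_component(
--     comp: Set[V2], grid_by_z: Dict[int, Dict[V2, int]], z: int, color: int, candidates: List[V2]
-- ) -> List[Rect]:
--     """
--     给定一个连通域，枚举所有能被候选砖/板完全覆盖的矩形（轴对齐）。
--     """
--     cells = list(comp)
--     xs = [c[0] for c in cells]
--     ys = [c[1] for c in cells]
--     minx, maxx = min(xs), max(xs)
--     miny, maxy = min(ys), max(ys)
--     candidates_in_bounds = []
--     for w, h in candidates:
--         if w <= (maxx - minx + 1) and h <= (maxy - miny + 1):
--             candidates_in_bounds.append((w, h))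
--     rects = []
--     for w, h in candidates_in_bounds:
--         for gx in range(minx, maxx - w + 2):
--             for gy in range(miny, maxy - h + 2):
--                 cand_rect = (gx, gy, gx + w - 1, gy + h - 1)
--                 cover = cells_in_rect(cand_rect)
--                 # 必须完全覆盖 comp 且不多占
--                 if cover.issubset(comp):
--                     rects.append(cand_rect)
--     # 去重并按面积降序
--     seen = set()
--     uniq = []
--     for r in rects:
--         if r not in seen:
--             seen.add(r)
--             uniq.append(r)
--     uniq.sort(key=rect_area, reverse=True)
--     return uniq
-- ===== SOURCE B (Python) =====
-- def propose_rects_from_component(comp, grid_by_z, z, color, candidates):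
--     """Enumerate the axis-aligned rectangles, over the candidate sizes, that lie
--     entirely inside the component.  A rectangle is inside the component iff it
--     holds exactly as many component cells as it has cells, so each anchor is
--     tested by one scan over the component instead of materialising the
--     rectangle's cell set."""
--     mem = set(comp)
--     minx = min(x for x, _ in mem)
--     maxx = max(x for x, _ in mem)
--     miny = min(y for _, y in mem)
--     maxy = max(y for _, y in mem)
--     out = []
--     for w, h in candidates:
--         if w <= maxx - minx + 1 and h <= maxy - miny + 1:
--             area = max(0, w) * max(0, h)
--             for gx in range(minx, maxx - w + 2):
--                 for gy in range(miny, maxy - h + 2):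
--                     inside = sum(1 for (x, y) in mem
--                                  if gx <= x <= gx + w - 1 and gy <= y <= gy + h - 1)
--                     if inside == area:
--                         out.append((gx, gy, gx + w - 1, gy + h - 1))
--     uniq = list(dict.fromkeys(out))
--     uniq.sort(key=lambda r: max(0, r[2] - r[0] + 1) * max(0, r[3] - r[1] + 1),
--               reverse=True)
--     return uniq
-- ===== Notes on version B (the rewrite author's own statement) =====
-- stated objective: alternative
-- what changed: Per anchor, B counts the component cells inside the candidate rectangle (one scan over the component) and accepts iff the count equals the rectangle's cell count, instead of A materialising the rectangle's cell set and subset-testing it against the component; B also dedups with dict.fromkeys instead of A's seen-set loop. Pre_ excludes only the empty component, on which A raises ValueError (min() of an empty sequence).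
import Mathlib
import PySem

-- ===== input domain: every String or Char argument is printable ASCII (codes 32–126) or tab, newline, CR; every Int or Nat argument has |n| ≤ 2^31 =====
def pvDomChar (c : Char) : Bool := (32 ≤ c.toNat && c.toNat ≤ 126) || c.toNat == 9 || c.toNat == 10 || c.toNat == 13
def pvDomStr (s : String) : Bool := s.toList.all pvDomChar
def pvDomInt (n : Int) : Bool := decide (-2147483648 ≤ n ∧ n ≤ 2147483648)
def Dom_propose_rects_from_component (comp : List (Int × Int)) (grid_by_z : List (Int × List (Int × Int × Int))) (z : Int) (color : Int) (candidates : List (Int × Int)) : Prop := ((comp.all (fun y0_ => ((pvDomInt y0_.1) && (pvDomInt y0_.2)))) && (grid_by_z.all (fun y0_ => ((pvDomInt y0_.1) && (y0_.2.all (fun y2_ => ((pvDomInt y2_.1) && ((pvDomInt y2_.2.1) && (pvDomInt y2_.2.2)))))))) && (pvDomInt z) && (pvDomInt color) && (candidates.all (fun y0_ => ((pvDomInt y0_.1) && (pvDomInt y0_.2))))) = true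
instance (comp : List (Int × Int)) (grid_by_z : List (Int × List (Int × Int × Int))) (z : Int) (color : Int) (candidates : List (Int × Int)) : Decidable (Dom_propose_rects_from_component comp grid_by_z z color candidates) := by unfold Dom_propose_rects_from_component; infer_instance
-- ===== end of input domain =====

-- ===== PORT A =====
-- B replaces A's per-anchor rectangle cell-set materialisation + subset test by one scan over the
-- component per anchor: the rectangle is covered iff it holds as many component cells as it has cells.
def pvRectArea (r : Int × Int × Int × Int) : Int :=
  max 0 (r.2.2.1 - r.1 + 1) * max 0 (r.2.2.2 - r.2.1 + 1)

-- {(x, y) for x in xs for y in ys}: the pairs are built as a Python set (PySem.Set.ofList; exact)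
def pvCellsInRect (r : Int × Int × Int × Int) : PySem.Set (Int × Int) :=
  PySem.Set.ofList ((PySem.List.pyRange r.1 (r.2.2.1 + 1) 1).flatMap (fun x =>
    (PySem.List.pyRange r.2.1 (r.2.2.2 + 1) 1).map (fun y => (x, y))))

def propose_rects_from_component (comp : List (Int × Int)) (grid_by_z : List (Int × List (Int × Int × Int))) (z : Int) (color : Int) (candidates : List (Int × Int)) : List (Int × Int × Int × Int) :=
  let cells := comp
  let xs := cells.map (fun c => c.1)
  let ys := cells.map (fun c => c.2)
  -- min()/max() raise ValueError on empty comp (excluded by Pre_); the .getD default is never reached there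
  let minx := (PySem.List.min? xs (fun v => v)).getD 0
  let maxx := (PySem.List.max? xs (fun v => v)).getD 0
  let miny := (PySem.List.min? ys (fun v => v)).getD 0
  let maxy := (PySem.List.max? ys (fun v => v)).getD 0
  let candidates_in_bounds := candidates.foldl (fun acc wh =>
    if wh.1 ≤ maxx - minx + 1 ∧ wh.2 ≤ maxy - miny + 1 then acc ++ [wh] else acc) []
  let rects := candidates_in_bounds.foldl (fun acc wh =>
    acc ++ ((PySem.List.pyRange minx (maxx - wh.1 + 2) 1).flatMap (fun gx =>
      (PySem.List.pyRange miny (maxy - wh.2 + 2) 1).filterMap (fun gy =>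
        let cand_rect := (gx, gy, gx + wh.1 - 1, gy + wh.2 - 1)
        if PySem.Set.issubset (pvCellsInRect cand_rect) comp then some cand_rect else none)))) []
  let dedup := rects.foldl (fun st r =>
    if PySem.Set.contains st.1 r then st else (PySem.Set.add st.1 r, st.2 ++ [r]))
    ((PySem.Set.empty : PySem.Set (Int × Int × Int × Int)), ([] : List (Int × Int × Int × Int)))
  PySem.List.sorted dedup.2 pvRectArea true

-- ===== PORT B =====
def propose_rects_from_component_alt (comp : List (Int × Int)) (grid_by_z : List (Int × List (Int × Int × Int))) (z : Int) (color : Int) (candidates : List (Int × Int)) : List (Int × Int × Int × Int) :=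
  let mem := PySem.Set.ofList comp
  let minx := (PySem.List.min? (comp.map (fun c => c.1)) (fun v => v)).getD 0
  let maxx := (PySem.List.max? (comp.map (fun c => c.1)) (fun v => v)).getD 0
  let miny := (PySem.List.min? (comp.map (fun c => c.2)) (fun v => v)).getD 0
  let maxy := (PySem.List.max? (comp.map (fun c => c.2)) (fun v => v)).getD 0
  let out := candidates.foldl (fun acc wh =>
    if wh.1 ≤ maxx - minx + 1 ∧ wh.2 ≤ maxy - miny + 1 then
      let area := max 0 wh.1 * max 0 wh.2
      acc ++ ((PySem.List.pyRange minx (maxx - wh.1 + 2) 1).flatMap (fun gx =>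
        (PySem.List.pyRange miny (maxy - wh.2 + 2) 1).filterMap (fun gy =>
          let inside : Int := mem.countP (fun c =>
            decide (gx ≤ c.1 ∧ c.1 ≤ gx + wh.1 - 1 ∧ gy ≤ c.2 ∧ c.2 ≤ gy + wh.2 - 1))
          if inside = area then some (gx, gy, gx + wh.1 - 1, gy + wh.2 - 1) else none)))
    else acc) []
  let uniq := PySem.List.dedup out
  PySem.List.sorted uniq (fun r => max 0 (r.2.2.1 - r.1 + 1) * max 0 (r.2.2.2 - r.2.1 + 1)) true

-- ===== PRECONDITION & SPEC =====
-- Pre_ excludes only the empty component, on which Python A raises ValueError (min() of an empty sequence).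
def Pre_propose_rects_from_component (comp : List (Int × Int)) (grid_by_z : List (Int × List (Int × Int × Int))) (z : Int) (color : Int) (candidates : List (Int × Int)) : Prop :=
  comp ≠ []
instance (comp : List (Int × Int)) (grid_by_z : List (Int × List (Int × Int × Int))) (z : Int) (color : Int) (candidates : List (Int × Int)) : Decidable (Pre_propose_rects_from_component comp grid_by_z z color candidates) := by unfold Pre_propose_rects_from_component; infer_instance

def pvWitness_propose_rects_from_component : (List (Int × Int)) × (List (Int × List (Int × Int × Int))) × Int × Int × (List (Int × Int)) :=
  ([(0, 0), (1, 0)], [], 0, 0, [(1, 1), (2, 1)])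

def Spec_propose_rects_from_component (comp : List (Int × Int)) (grid_by_z : List (Int × List (Int × Int × Int))) (z : Int) (color : Int) (candidates : List (Int × Int)) (out : List (Int × Int × Int × Int)) : Prop := out = propose_rects_from_component_alt comp grid_by_z z color candidates
instance (comp : List (Int × Int)) (grid_by_z : List (Int × List (Int × Int × Int))) (z : Int) (color : Int) (candidates : List (Int × Int)) (out : List (Int × Int × Int × Int)) : Decidable (Spec_propose_rects_from_component comp grid_by_z z color candidates out) := by unfold Spec_propose_rects_from_component; infer_instance

-- ===== CLAIM (what is proved, stated in full; the proofs are below) =====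
def Claim_equal_propose_rects_from_component : Prop := ∀ (comp : List (Int × Int)) (grid_by_z : List (Int × List (Int × Int × Int))) (z : Int) (color : Int) (candidates : List (Int × Int)), Dom_propose_rects_from_component comp grid_by_z z color candidates → Pre_propose_rects_from_component comp grid_by_z z color candidates → Spec_propose_rects_from_component comp grid_by_z z color candidates (propose_rects_from_component comp grid_by_z z color candidates)

-- ===== LEMMAS AND PROOFS =====

-- the rectangle's cells as a list (A's set comprehension before deduplication)
def pvRectList (gx gy w h : Int) : List (Int × Int) :=
  (PySem.List.pyRange gx (gx + w - 1 + 1) 1).flatMap (fun x =>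
    (PySem.List.pyRange gy (gy + h - 1 + 1) 1).map (fun y => (x, y)))

theorem pvRectList_nodup (gx gy w h : Int) : (pvRectList gx gy w h).Nodup := by
  unfold pvRectList
  exact (PySem.List.nodup_pyRange_one _ _).product (PySem.List.nodup_pyRange_one _ _)

theorem pvRectList_length (gx gy w h : Int) :
    ((pvRectList gx gy w h).length : Int) = max 0 w * max 0 h := by
  unfold pvRectList
  rw [show ((PySem.List.pyRange gx (gx + w - 1 + 1) 1).flatMap (fun x =>
      (PySem.List.pyRange gy (gy + h - 1 + 1) 1).map (fun y => (x, y))))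
      = (PySem.List.pyRange gx (gx + w - 1 + 1) 1) ×ˢ (PySem.List.pyRange gy (gy + h - 1 + 1) 1) from rfl]
  rw [List.length_product, PySem.List.length_pyRange_one, PySem.List.length_pyRange_one]
  have e1 : (((gx + w - 1 + 1 - gx).toNat : Nat) : Int) = max 0 w := by omega
  have e2 : (((gy + h - 1 + 1 - gy).toNat : Nat) : Int) = max 0 h := by omega
  push_cast
  rw [e1, e2]

theorem pvRectList_mem (gx gy w h : Int) (c : Int × Int) :
    c ∈ pvRectList gx gy w h ↔ (gx ≤ c.1 ∧ c.1 ≤ gx + w - 1 ∧ gy ≤ c.2 ∧ c.2 ≤ gy + h - 1) := by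
  unfold pvRectList
  simp only [List.mem_flatMap, List.mem_map]
  constructor
  · rintro ⟨x, hx, y, hy, rfl⟩
    rw [PySem.List.mem_pyRange_one] at hx hy
    exact ⟨by omega, by omega, by omega, by omega⟩
  · rintro ⟨h1, h2, h3, h4⟩
    exact ⟨c.1, by rw [PySem.List.mem_pyRange_one]; omega,
           c.2, by rw [PySem.List.mem_pyRange_one]; omega, rfl⟩

theorem pvCells_eq_rectList (gx gy w h : Int) :
    pvCellsInRect (gx, gy, gx + w - 1, gy + h - 1) = PySem.Set.ofList (pvRectList gx gy w h) := rfl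

-- A's subset test agrees with B's component-scan count test at every anchor
theorem pvCount_iff (comp : List (Int × Int)) (gx gy w h : Int) :
    (PySem.Set.issubset (pvCellsInRect (gx, gy, gx + w - 1, gy + h - 1)) comp = true)
      ↔ (((PySem.Set.ofList comp).countP (fun c =>
            decide (gx ≤ c.1 ∧ c.1 ≤ gx + w - 1 ∧ gy ≤ c.2 ∧ c.2 ≤ gy + h - 1)) : Int)
          = max 0 w * max 0 h) := by
  set p : Int × Int → Bool := fun c =>
    decide (gx ≤ c.1 ∧ c.1 ≤ gx + w - 1 ∧ gy ≤ c.2 ∧ c.2 ≤ gy + h - 1) with hp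
  set R := pvRectList gx gy w h with hR
  set S := PySem.Set.ofList comp with hS
  have hSnodup : S.Nodup := PySem.Set.nodup_ofList comp
  have hRnodup : R.Nodup := pvRectList_nodup gx gy w h
  have hpmem : ∀ c, p c = true ↔ c ∈ R := by
    intro c
    rw [hp, hR, pvRectList_mem]
    simp
  have hcount : (S.countP p : Int) = ((S.filter p).length : Int) := by
    rw [List.countP_eq_length_filter]
  have hFnodup : (S.filter p).Nodup := hSnodup.filter p
  rw [pvCells_eq_rectList, PySem.Set.issubset_iff, hcount, ← pvRectList_length gx gy w h, ← hR]
  have hFsubR : S.filter p ⊆ R := by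
    intro c hc
    exact (hpmem c).mp (List.of_mem_filter hc)
  constructor
  · -- all rect cells in comp → the filter is all of R
    intro hsub
    have hRsubF : R ⊆ S.filter p := by
      intro c hc
      have hcS : c ∈ S := by
        rw [hS, PySem.Set.mem_ofList]
        exact hsub c (by rw [PySem.Set.mem_ofList]; exact hc)
      exact List.mem_filter.mpr ⟨hcS, (hpmem c).mpr hc⟩
    have hperm : (S.filter p).Perm R :=
      (List.perm_ext_iff_of_nodup hFnodup hRnodup).mpr (fun c => ⟨fun h => hFsubR h, fun h => hRsubF h⟩)
    rw [hperm.length_eq]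
  · -- equal counts → the filter exhausts R, so every rect cell is in comp
    intro hlen
    have hcard : (S.filter p).toFinset.card = R.toFinset.card := by
      rw [List.toFinset_card_of_nodup hFnodup, List.toFinset_card_of_nodup hRnodup]
      omega
    have hsubF : (S.filter p).toFinset ⊆ R.toFinset := by
      intro c hc
      rw [List.mem_toFinset] at hc ⊢
      exact hFsubR hc
    have heq : (S.filter p).toFinset = R.toFinset :=
      Finset.eq_of_subset_of_card_le hsubF (le_of_eq hcard.symm)
    intro c hc
    rw [PySem.Set.mem_ofList] at hc
    have : c ∈ (S.filter p).toFinset := by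
      rw [heq, List.mem_toFinset]
      exact hc
    rw [List.mem_toFinset, List.mem_filter] at this
    have hc2 := this.1
    rw [hS, PySem.Set.mem_ofList] at hc2
    exact hc2

theorem pv_flatMap_congr_mem {α β : Type} (l : List α) (f g : α → List β)
    (h : ∀ x ∈ l, f x = g x) : l.flatMap f = l.flatMap g := by
  induction l with
  | nil => rfl
  | cons a t ih => simp only [List.flatMap_cons]; rw [h a (by simp), ih (fun x hx => h x (by simp [hx]))]

theorem pv_filterMap_congr {α β : Type} (l : List α) (f g : α → Option β)
    (h : ∀ x, f x = g x) : l.filterMap f = l.filterMap g := by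
  induction l with
  | nil => rfl
  | cons a t ih => simp only [List.filterMap_cons]; rw [h a, ih]

theorem pv_foldl_append_filter {α : Type} (P : α → Prop) [DecidablePred P] (l : List α) (init : List α) :
    l.foldl (fun a x => if P x then a ++ [x] else a) init = init ++ l.filter (fun x => decide (P x)) := by
  induction l generalizing init with
  | nil => simp
  | cons a t ih => by_cases h : P a <;> simp [h, ih]

theorem pv_foldl_filter {α β : Type} (P : α → Prop) [DecidablePred P] (f : β → α → β) (l : List α) (init : β) :
    (l.filter (fun x => decide (P x))).foldl f init = l.foldl (fun acc x => if P x then f acc x else acc) init := by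
  induction l generalizing init with
  | nil => rfl
  | cons a t ih => by_cases h : P a <;> simp [h, ih]

theorem pv_dedup_pair {α : Type} [BEq α] [LawfulBEq α] (l : List α) (s : PySem.Set α) :
    (l.foldl (fun st r => if PySem.Set.contains st.1 r then st else (PySem.Set.add st.1 r, st.2 ++ [r])) (s, s)).2
      = l.foldl PySem.Set.add s := by
  induction l generalizing s with
  | nil => rfl
  | cons a t ih =>
    simp only [List.foldl_cons]
    by_cases hc : PySem.Set.contains s a = true
    · rw [if_pos hc, show PySem.Set.add s a = s by unfold PySem.Set.add; rw [hc]; simp]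
      exact ih s
    · rw [if_neg hc, show PySem.Set.add s a = s ++ [a] by unfold PySem.Set.add; rw [Bool.not_eq_true] at hc; rw [hc]; simp]
      exact ih (s ++ [a])

theorem pv_dedup_eq {α : Type} [BEq α] [LawfulBEq α] (l : List α) :
    (l.foldl (fun st r => if PySem.Set.contains st.1 r then st else (PySem.Set.add st.1 r, st.2 ++ [r]))
        ((PySem.Set.empty : PySem.Set α), ([] : List α))).2
      = PySem.List.dedup l := by
  have h0 : (PySem.Set.empty : PySem.Set α) = ([] : List α) := rfl
  rw [show ((PySem.Set.empty : PySem.Set α), ([] : List α)) = ((PySem.Set.empty : PySem.Set α), (PySem.Set.empty : PySem.Set α)) from by rw [h0]]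
  rw [pv_dedup_pair, PySem.List.dedup_eq_ofList, PySem.Set.ofList_eq_foldl]
  rfl

-- per-candidate: A's step (subset tests) equals B's step (count tests)
theorem pv_step_eq (comp : List (Int × Int)) (minx maxx miny maxy : Int)
    (acc : List (Int × Int × Int × Int)) (wh : Int × Int) :
    (if wh.1 ≤ maxx - minx + 1 ∧ wh.2 ≤ maxy - miny + 1 then
      acc ++ ((PySem.List.pyRange minx (maxx - wh.1 + 2) 1).flatMap (fun gx =>
        (PySem.List.pyRange miny (maxy - wh.2 + 2) 1).filterMap (fun gy =>
          if PySem.Set.issubset (pvCellsInRect (gx, gy, gx + wh.1 - 1, gy + wh.2 - 1)) comp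
          then some (gx, gy, gx + wh.1 - 1, gy + wh.2 - 1) else none)))
     else acc)
    = (if wh.1 ≤ maxx - minx + 1 ∧ wh.2 ≤ maxy - miny + 1 then
        acc ++ ((PySem.List.pyRange minx (maxx - wh.1 + 2) 1).flatMap (fun gx =>
          (PySem.List.pyRange miny (maxy - wh.2 + 2) 1).filterMap (fun gy =>
            if (((PySem.Set.ofList comp).countP (fun c =>
                  decide (gx ≤ c.1 ∧ c.1 ≤ gx + wh.1 - 1 ∧ gy ≤ c.2 ∧ c.2 ≤ gy + wh.2 - 1)) : Int)
                = max 0 wh.1 * max 0 wh.2)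
            then some (gx, gy, gx + wh.1 - 1, gy + wh.2 - 1) else none)))
       else acc) := by
  by_cases hP : wh.1 ≤ maxx - minx + 1 ∧ wh.2 ≤ maxy - miny + 1
  · rw [if_pos hP, if_pos hP]
    congr 1
    apply pv_flatMap_congr_mem
    intro gx _
    apply pv_filterMap_congr
    intro gy
    exact if_congr (pvCount_iff comp gx gy wh.1 wh.2) rfl rfl
  · rw [if_neg hP, if_neg hP]

-- ===== VERDICT (by name: the statement is the Claim_ definition above) =====
theorem propose_rects_from_component_spec : Claim_equal_propose_rects_from_component := by
  intro comp grid_by_z z color candidates hdom hpre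
  unfold Spec_propose_rects_from_component
  simp only [propose_rects_from_component, propose_rects_from_component_alt]
  rw [show (fun r : Int × Int × Int × Int => max 0 (r.2.2.1 - r.1 + 1) * max 0 (r.2.2.2 - r.2.1 + 1)) = pvRectArea from rfl]
  congr 1
  rw [pv_dedup_eq]
  congr 1
  rw [pv_foldl_append_filter, List.nil_append, pv_foldl_filter]
  apply PySem.List.foldl_congr_mem
  intro acc wh hwh
  exact pv_step_eq comp _ _ _ _ acc wh
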